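-- pv_equiv track=rewrite | github.com/gaolei-he/vscode | nowcoder/2023牛客暑假多校/2023牛客暑假多校第六场/c.py | solve
-- ===== SOURCE A (Python) =====
-- def solve(n:int)->int:
--     def f(n:int)->int:
--         res = 1
--         while n > 0:
--             res *= n
--             n -= 2
--         return res
--     sm = 1
--     for i in range(1, n + 1):
--         sm *= f(i)
--     ans = 0
--     while sm % 10 == 0:
--         sm //= 10
--         ans += 1
--     return ans
-- ===== SOURCE B (Python) =====
-- def solve(n: int) -> int:
--     def vp(x: int, p: int) -> int:
--         c = 0
--         while x % p == 0:
--             x //= p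
--             c += 1
--         return c
--     e2 = 0
--     e5 = 0
--     for j in range(1, n + 1):
--         m = (n - j) // 2 + 1
--         e2 += m * vp(j, 2)
--         e5 += m * vp(j, 5)
--     return min(e2, e5)
-- ===== Notes on version B (the rewrite author's own statement) =====
-- stated objective: faster
-- what changed: Instead of multiplying every double factorial up to n into one huge integer and stripping trailing zeros by repeated division, B sums the exponents of 2 and 5 contributed by each factor j (which occurs in (n-j)//2+1 of the double factorials) in machine-size integers and returns the minimum of the two exponent sums.
import Mathlib
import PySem

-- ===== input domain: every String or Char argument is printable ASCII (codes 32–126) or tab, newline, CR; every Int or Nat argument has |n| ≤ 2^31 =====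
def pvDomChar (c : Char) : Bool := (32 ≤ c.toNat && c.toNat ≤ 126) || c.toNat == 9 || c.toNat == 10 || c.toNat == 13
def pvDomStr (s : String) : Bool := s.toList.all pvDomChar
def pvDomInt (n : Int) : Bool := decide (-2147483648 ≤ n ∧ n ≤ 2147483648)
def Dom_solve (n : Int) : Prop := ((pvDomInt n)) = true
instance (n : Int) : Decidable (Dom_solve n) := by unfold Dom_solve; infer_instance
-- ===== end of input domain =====

-- B replaces A's huge big-integer product of double factorials by summing, in machine-size
-- integers, the exponents of 2 and 5 contributed by each factor, and returns their minimum.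

-- ===== PORT A =====
-- inner f: res = 1; while n > 0: res *= n; n -= 2
def fAux (res : Int) (n : Int) : Int :=
  if 0 < n then fAux (res * n) (n - 2) else res
termination_by n.toNat
decreasing_by omega

-- while sm % 10 == 0: sm //= 10; ans += 1   ('0 < sm' is a totality guard only:
-- in solve, sm is a product of positives, and Python diverges on sm = 0)
def tzAux (ans : Int) (sm : Int) : Int :=
  if PySem.Int.mod sm 10 = 0 ∧ 0 < sm then tzAux (ans + 1) (PySem.Int.floordiv sm 10) else ans
termination_by sm.toNat
decreasing_by
  rename_i h
  rw [PySem.Int.floordiv_eq_ediv_of_pos (by omega : (0:Int) < 10)]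
  omega

def solve (n : Int) : Int :=
  let sm := (PySem.List.pyRange 1 (n + 1) 1).foldl (fun sm i => sm * fAux 1 i) 1
  tzAux 0 sm

-- ===== PORT B =====
-- c = 0; while x % p == 0: x //= p; c += 1   ('0 < x ∧ 1 < p' is a totality guard only:
-- solve_alt calls it with x ≥ 1 and p ∈ {2, 5}, where Python's loop terminates)
def vpAux (c : Int) (x : Int) (p : Int) : Int :=
  if PySem.Int.mod x p = 0 ∧ 0 < x ∧ 1 < p then vpAux (c + 1) (PySem.Int.floordiv x p) p else c
termination_by x.toNat
decreasing_by
  rename_i h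
  rw [PySem.Int.floordiv_eq_ediv_of_pos (by omega : (0:Int) < p)]
  have hlt : x / p < x := by
    rw [Int.ediv_lt_iff_lt_mul (by omega : (0:Int) < p)]
    nlinarith [h.2.1, h.2.2]
  omega

def solve_alt (n : Int) : Int :=
  let r := (PySem.List.pyRange 1 (n + 1) 1).foldl
    (fun e j =>
      let m := PySem.Int.floordiv (n - j) 2 + 1
      (e.1 + m * vpAux 0 j 2, e.2 + m * vpAux 0 j 5)) ((0 : Int), (0 : Int))
  min r.1 r.2

-- ===== PRECONDITION & SPEC =====
def Spec_solve (n : Int) (out : Int) : Prop := out = solve_alt n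
instance (n : Int) (out : Int) : Decidable (Spec_solve n out) := by unfold Spec_solve; infer_instance

-- ===== CLAIM (what is proved, stated in full; the proofs are below) =====
def Claim_equal_solve : Prop := ∀ (n : Int), Dom_solve n → Spec_solve n (solve n)

-- ===== LEMMAS AND PROOFS =====

-- double factorial on Nat
def dfac : Nat → Nat
  | 0 => 1
  | 1 => 1
  | (m + 2) => (m + 2) * dfac m

lemma dfac_pos (m : Nat) : 0 < dfac m := by
  induction m using dfac.induct with
  | case1 => simp [dfac]
  | case2 => simp [dfac]
  | case3 m ih => simp [dfac]; positivity

lemma fAux_eq (m : Nat) : ∀ res : Int, fAux res (m : Int) = res * (dfac m : Int) := by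
  induction m using dfac.induct with
  | case1 => intro res; rw [fAux]; simp [dfac]
  | case2 =>
      intro res
      rw [fAux]; simp only [show ((1:Nat):Int) = 1 by norm_num, if_pos (by omega : (0:Int) < 1)]
      rw [fAux]; simp [dfac]
  | case3 m ih =>
      intro res
      rw [fAux]
      have h1 : (0:Int) < ((m + 2 : Nat) : Int) := by push_cast; omega
      rw [if_pos h1]
      have h2 : ((m + 2 : Nat) : Int) - 2 = (m : Int) := by push_cast; ring
      rw [h2, ih]
      push_cast [dfac]; ring

-- pure Nat p-adic valuation mirroring vpAux
def nuN (p : Nat) (m : Nat) : Nat :=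
  if 2 ≤ p ∧ 0 < m ∧ p ∣ m then nuN p (m / p) + 1 else 0
termination_by m
decreasing_by
  rename_i h
  exact Nat.div_lt_self h.2.1 (by omega)

lemma vpAux_eq (p : Nat) (hp : 2 ≤ p) (m : Nat) :
    ∀ c : Int, vpAux c (m : Int) (p : Int) = c + (nuN p m : Int) := by
  induction m using Nat.strong_induction_on with
  | _ m ih =>
    intro c
    rw [vpAux, nuN]
    by_cases hd : p ∣ m ∧ 0 < m
    · have h1 : m % p = 0 := Nat.mod_eq_zero_of_dvd hd.1
      rw [if_pos (show (2:Nat) <= p ∧ 0 < m ∧ p ∣ m from ⟨hp, hd.2, hd.1⟩),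
          if_pos (show PySem.Int.mod (m:Int) (p:Int) = 0 ∧ (0:Int) < (m:Int) ∧ (1:Int) < (p:Int) from
            ⟨by rw [PySem.Int.mod_natCast]; exact_mod_cast h1, by exact_mod_cast hd.2, by exact_mod_cast hp⟩),
          show PySem.Int.floordiv (m:Int) (p:Int) = ((m / p : Nat) : Int) from PySem.Int.floordiv_natCast m p,
          ih (m / p) (Nat.div_lt_self hd.2 (by omega))]
      push_cast
      ring
    · rw [if_neg, if_neg (by tauto)]
      · simp
      · rintro ⟨hmod, hpos, -⟩
        apply hd
        rw [PySem.Int.mod_natCast] at hmod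
        exact ⟨Nat.dvd_of_mod_eq_zero (by exact_mod_cast hmod), by exact_mod_cast hpos⟩

lemma nuN_eq_fact (p : Nat) (hp : p.Prime) (m : Nat) :
    0 < m → nuN p m = m.factorization p := by
  induction m using Nat.strong_induction_on with
  | _ m ih =>
    intro hm
    rw [nuN]
    by_cases hd : p ∣ m
    · rw [if_pos ⟨hp.two_le, hm, hd⟩]
      obtain ⟨q, rfl⟩ := hd
      have hq : 0 < q := by
        rcases Nat.eq_zero_or_pos q with h | h
        · subst h; simp at hm
        · exact h
      have hlt : q < p * q := by nlinarith [hp.two_le]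
      rw [Nat.mul_div_cancel_left q hp.pos, ih q hlt hq,
          Nat.factorization_mul hp.pos.ne' hq.ne']
      simp [hp.factorization, Finsupp.single_eq_same]
      omega
    · rw [if_neg (by tauto), Nat.factorization_eq_zero_of_not_dvd hd]

lemma fact_ten (p : Nat) (hp : p = 2 ∨ p = 5) : Nat.factorization 10 p = 1 := by
  rw [show (10 : Nat) = 2 * 5 from rfl,
      Nat.factorization_mul (by norm_num) (by norm_num)]
  rcases hp with h | h <;> subst h <;>
    simp [Nat.prime_two.factorization, Nat.prime_five.factorization]

-- trailing-zero loop = min of 2- and 5-adic valuations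
lemma tzAux_eq (m : Nat) :
    0 < m → ∀ a : Int,
      tzAux a (m : Int) = a + (min (m.factorization 2) (m.factorization 5) : Int) := by
  induction m using Nat.strong_induction_on with
  | _ m ih =>
    intro hm a
    rw [tzAux]
    have h0 : PySem.Int.mod (m : Int) 10 = ((m % 10 : Nat) : Int) := by
      exact_mod_cast PySem.Int.mod_natCast m 10
    by_cases hd : 10 ∣ m
    · rw [if_pos ⟨by rw [h0]; exact_mod_cast Nat.mod_eq_zero_of_dvd hd,
                  by exact_mod_cast hm⟩]
      have hfd : PySem.Int.floordiv (m : Int) (10 : Int) = ((m / 10 : Nat) : Int) := by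
        exact_mod_cast PySem.Int.floordiv_natCast m 10
      obtain ⟨q, rfl⟩ := hd
      have hq : 0 < q := by omega
      have hdiv : 10 * q / 10 = q := by omega
      rw [hfd, hdiv, ih q (by omega) hq (a + 1),
          Nat.factorization_mul (by norm_num) hq.ne',
          Finsupp.add_apply, Finsupp.add_apply,
          fact_ten 2 (Or.inl rfl), fact_ten 5 (Or.inr rfl)]
      push_cast
      omega
    · rw [if_neg (by
        rintro ⟨h1, h2⟩
        rw [h0] at h1
        exact hd (Nat.dvd_of_mod_eq_zero (by exact_mod_cast h1)))]
      have hmin : min (m.factorization 2) (m.factorization 5) = 0 := by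
        by_cases h2 : 2 ∣ m
        · by_cases h5 : 5 ∣ m
          · exact absurd (Nat.Coprime.mul_dvd_of_dvd_of_dvd (by decide) h2 h5) hd
          · rw [Nat.factorization_eq_zero_of_not_dvd h5]; omega
        · rw [Nat.factorization_eq_zero_of_not_dvd h2]; omega
      have : (min ((m.factorization 2 : Nat) : Int) ((m.factorization 5 : Nat) : Int)) = 0 := by
        omega
      rw [this, add_zero]

-- the combinatorial core, for an abstract multiplicative weight ν
def GG (ν : Nat → Nat) (m : Nat) : Nat :=
  ∑ j ∈ Finset.range m, if (m - (j + 1)) % 2 = 0 then ν (j + 1) else 0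

def TT (ν : Nat → Nat) (n : Nat) : Nat :=
  ∑ j ∈ Finset.range n, ((n - (j + 1)) / 2 + 1) * ν (j + 1)

lemma nu_dfac (ν : Nat → Nat) (hν1 : ν 1 = 0)
    (hmul : ∀ a b, 0 < a → 0 < b → ν (a * b) = ν a + ν b) (m : Nat) :
    ν (dfac m) = GG ν m := by
  induction m using dfac.induct with
  | case1 => simp [dfac, GG, hν1]
  | case2 => simp [dfac, GG, hν1]
  | case3 m ih =>
    have h1 : ν (dfac (m + 2)) = ν (m + 2) + ν (dfac m) := by
      rw [dfac]; exact hmul _ _ (by omega) (dfac_pos m)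
    rw [h1, ih]
    unfold GG
    rw [Finset.sum_range_succ, Finset.sum_range_succ]
    rw [if_pos (by omega : (m + 2 - (m + 1 + 1)) % 2 = 0),
        if_neg (by omega : ¬ (m + 2 - (m + 1)) % 2 = 0)]
    have hs : ∑ j ∈ Finset.range m, (if (m + 2 - (j + 1)) % 2 = 0 then ν (j + 1) else 0)
        = ∑ j ∈ Finset.range m, (if (m - (j + 1)) % 2 = 0 then ν (j + 1) else 0) := by
      apply Finset.sum_congr rfl
      intro j hj
      have hj' := Finset.mem_range.mp hj
      have : (m + 2 - (j + 1)) % 2 = (m - (j + 1)) % 2 := by omega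
      rw [this]
    rw [hs]
    ring

lemma SS_eq_TT (ν : Nat → Nat) (hν1 : ν 1 = 0)
    (hmul : ∀ a b, 0 < a → 0 < b → ν (a * b) = ν a + ν b) (n : Nat) :
    ∑ i ∈ Finset.range n, ν (dfac (i + 1)) = TT ν n := by
  induction n with
  | zero => simp [TT]
  | succ n ih =>
    rw [Finset.sum_range_succ, ih, nu_dfac ν hν1 hmul (n + 1)]
    unfold TT GG
    rw [Finset.sum_range_succ, Finset.sum_range_succ (n := n)]
    rw [if_pos (by omega : (n + 1 - (n + 1)) % 2 = 0)]
    have hs : ∑ j ∈ Finset.range n, ((n - (j + 1)) / 2 + 1) * ν (j + 1)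
        + ∑ j ∈ Finset.range n, (if (n + 1 - (j + 1)) % 2 = 0 then ν (j + 1) else 0)
        = ∑ j ∈ Finset.range n, ((n + 1 - (j + 1)) / 2 + 1) * ν (j + 1) := by
      rw [← Finset.sum_add_distrib]
      apply Finset.sum_congr rfl
      intro j hj
      have hj' := Finset.mem_range.mp hj
      by_cases hpar : (n + 1 - (j + 1)) % 2 = 0
      · rw [if_pos hpar]
        have : (n + 1 - (j + 1)) / 2 = (n - (j + 1)) / 2 + 1 := by omega
        rw [this]; ring
      · rw [if_neg hpar]
        have : (n + 1 - (j + 1)) / 2 = (n - (j + 1)) / 2 := by omega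
        rw [this]; ring
    have hlast : (n + 1 - (n + 1)) / 2 + 1 = 1 := by omega
    rw [hlast]
    omega

-- product of the double factorials
def P (n : Nat) : Nat := ∏ i ∈ Finset.range n, dfac (i + 1)

lemma P_pos (n : Nat) : 0 < P n := Finset.prod_pos (fun _ _ => dfac_pos _)

lemma fact_P (p : Nat) (n : Nat) :
    (P n).factorization p = ∑ i ∈ Finset.range n, (dfac (i + 1)).factorization p := by
  induction n with
  | zero => simp [P]
  | succ n ih =>
    rw [Finset.sum_range_succ, ← ih]
    show (P (n + 1)).factorization p = _
    rw [show P (n + 1) = P n * dfac (n + 1) from Finset.prod_range_succ _ n,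
        Nat.factorization_mul (P_pos n).ne' (dfac_pos _).ne', Finsupp.add_apply]

-- fold helpers
lemma foldl_mul_range (g : Nat → Int) (n : Nat) :
    ∀ a : Int, (List.range n).foldl (fun acc k => acc * g k) a = a * ∏ k ∈ Finset.range n, g k := by
  induction n with
  | zero => intro a; simp
  | succ n ih =>
      intro a
      rw [List.range_succ, List.foldl_append, ih, Finset.prod_range_succ]
      simp [mul_assoc]

lemma foldl_pair_add_range (g h : Nat → Int) (n : Nat) :
    ∀ a b : Int, (List.range n).foldl (fun e k => (e.1 + g k, e.2 + h k)) (a, b)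
      = (a + ∑ k ∈ Finset.range n, g k, b + ∑ k ∈ Finset.range n, h k) := by
  induction n with
  | zero => intro a b; simp
  | succ n ih =>
      intro a b
      rw [List.range_succ, List.foldl_append, ih, Finset.sum_range_succ, Finset.sum_range_succ]
      simp [add_assoc]

-- the multiplicative-weight hypotheses for ν = factorization at a prime p
lemma hnu1 (p : Nat) : (1 : Nat).factorization p = 0 := by simp

lemma hnumul (p : Nat) : ∀ a b : Nat, 0 < a → 0 < b →
    (a * b).factorization p = a.factorization p + b.factorization p := by
  intro a b ha hb
  rw [Nat.factorization_mul ha.ne' hb.ne', Finsupp.add_apply]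

-- A's big product, evaluated: the foldl equals the cast of P n'
lemma smA_eq (n : Int) :
    (List.range n.toNat).foldl (fun (sm : Int) (k : Nat) => sm * fAux 1 (1 + (k : Int))) 1
      = ((P n.toNat : Nat) : Int) := by
  have hf : ∀ k : Nat, fAux 1 (1 + (k : Int)) = ((dfac (k + 1) : Nat) : Int) := by
    intro k
    have h : (1 + (k : Int)) = ((k + 1 : Nat) : Int) := by push_cast; ring
    rw [h, fAux_eq, one_mul]
  rw [foldl_mul_range (fun k => fAux 1 (1 + (k : Int))) n.toNat 1, one_mul,
      Finset.prod_congr rfl (fun k _ => hf k), ← Nat.cast_prod]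
  rfl

-- B's exponent sum for one prime, evaluated: equals the cast of TT
lemma eB_eq (n : Int) (p : Nat) (hp : p.Prime) :
    ∑ k ∈ Finset.range n.toNat,
        (PySem.Int.floordiv (n - (1 + (k : Int))) 2 + 1) * vpAux 0 (1 + (k : Int)) (p : Int)
      = ((TT (fun j => j.factorization p) n.toNat : Nat) : Int) := by
  rw [TT, Nat.cast_sum]
  apply Finset.sum_congr rfl
  intro k hk
  have hk' := Finset.mem_range.mp hk
  have h1 : n - (1 + (k : Int)) = ((n.toNat - (k + 1) : Nat) : Int) := by omega
  have h2 : PySem.Int.floordiv ((n.toNat - (k + 1) : Nat) : Int) 2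
      = (((n.toNat - (k + 1)) / 2 : Nat) : Int) := by
    exact_mod_cast PySem.Int.floordiv_natCast (n.toNat - (k + 1)) 2
  have h3 : vpAux 0 (1 + (k : Int)) (p : Int) = ((nuN p (k + 1) : Nat) : Int) := by
    have hc : (1 + (k : Int)) = ((k + 1 : Nat) : Int) := by push_cast; ring
    rw [hc, vpAux_eq p hp.two_le (k + 1) 0, zero_add]
  rw [h1, h2, h3, nuN_eq_fact p hp (k + 1) (by omega)]
  push_cast
  ring

-- ===== VERDICT (by name: the statement is the Claim_ definition above) =====
theorem solve_spec : Claim_equal_solve := by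
  intro n _
  show solve n = solve_alt n
  unfold solve solve_alt
  have hr : PySem.List.pyRange 1 (n + 1) 1
      = (List.range n.toNat).map (fun k : Nat => (1 : Int) + (k : Int)) := by
    rw [PySem.List.pyRange_one]
    congr 2
    omega
  simp only [hr, List.foldl_map]
  rw [smA_eq n, tzAux_eq (P n.toNat) (P_pos _) 0,
      foldl_pair_add_range
        (fun k => (PySem.Int.floordiv (n - (1 + (k : Int))) 2 + 1) * vpAux 0 (1 + (k : Int)) 2)
        (fun k => (PySem.Int.floordiv (n - (1 + (k : Int))) 2 + 1) * vpAux 0 (1 + (k : Int)) 5)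
        n.toNat 0 0]
  dsimp only
  have e2 := eB_eq n 2 Nat.prime_two
  have e5 := eB_eq n 5 Nat.prime_five
  norm_cast at e2 e5 ⊢
  rw [zero_add, zero_add, zero_add, e2, e5,
      fact_P 2 n.toNat, fact_P 5 n.toNat,
      SS_eq_TT (fun j => j.factorization 2) (hnu1 2) (hnumul 2) n.toNat,
      SS_eq_TT (fun j => j.factorization 5) (hnu1 5) (hnumul 5) n.toNat]
  push_cast
  ring
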